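-- pv_equiv track=rewrite | github.com/RRL-ALeRT/gpp_action_examples | python/gpp_action_examples/frontier_exploration_action_server.py | assign_groups
-- ===== SOURCE A (Python) =====
-- def assign_groups(matrix):
--     group = 1
--     groups = {}
--     visited = set()
--     stack = []
--
--     def dfs(matrix, i, j, group, groups):
--         stack.append((i, j))
--         while stack:
--             x, y = stack.pop()
--             if (x, y) in visited:
--                 continue
--             visited.add((x, y))
--             if matrix[x][y] != 2:
--                 continue
--             if group in groups:
--                 groups[group].append((x, y))
--             else:
--                 groups[group] = [(x, y)]
--             for dx, dy in [(1, 0), (-1, 0), (0, 1), (0, -1), (1, 1), (-1, -1), (-1, 1), (1, -1)]: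
--                 nx, ny = x + dx, y + dy
--                 if 0 <= nx < len(matrix) and 0 <= ny < len(matrix[0]):
--                     stack.append((nx, ny))
--
--         return group + 1
--
--     for i in range(len(matrix)):
--         for j in range(len(matrix[0])):
--             if matrix[i][j] == 2 and (i, j) not in visited:
--                 group = dfs(matrix, i, j, group, groups)
--
--     return matrix, groups
-- ===== SOURCE B (Python) =====
-- def assign_groups(matrix):
--     rows = len(matrix)
--     cols = len(matrix[0]) if matrix else 0
--     group = 1
--     groups = {}
--     visited = set()
--
--     def dfs(x, y):
--         if not (0 <= x < rows and 0 <= y < cols) or (x, y) in visited: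
--             return
--         visited.add((x, y))
--         if matrix[x][y] != 2:
--             return
--         if group in groups:
--             groups[group].append((x, y))
--         else:
--             groups[group] = [(x, y)]
--         for dx, dy in [(1, -1), (-1, 1), (-1, -1), (1, 1), (0, -1), (0, 1), (-1, 0), (1, 0)]:
--             dfs(x + dx, y + dy)
--
--     for i in range(rows):
--         for j in range(cols):
--             if matrix[i][j] == 2 and (i, j) not in visited:
--                 dfs(i, j)
--                 group += 1
--
--     return matrix, groups
-- ===== Notes on version B (the rewrite author's own statement) =====
-- stated objective: alternative
-- what changed: The explicit-stack worklist DFS (push all 8 neighbours, skip visited at pop) is replaced by a genuine recursive flood fill whose dfs guards bounds/visited at entry and recurses over the 8 neighbours in reversed order, reproducing the stack's LIFO pop order.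
import Mathlib
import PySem

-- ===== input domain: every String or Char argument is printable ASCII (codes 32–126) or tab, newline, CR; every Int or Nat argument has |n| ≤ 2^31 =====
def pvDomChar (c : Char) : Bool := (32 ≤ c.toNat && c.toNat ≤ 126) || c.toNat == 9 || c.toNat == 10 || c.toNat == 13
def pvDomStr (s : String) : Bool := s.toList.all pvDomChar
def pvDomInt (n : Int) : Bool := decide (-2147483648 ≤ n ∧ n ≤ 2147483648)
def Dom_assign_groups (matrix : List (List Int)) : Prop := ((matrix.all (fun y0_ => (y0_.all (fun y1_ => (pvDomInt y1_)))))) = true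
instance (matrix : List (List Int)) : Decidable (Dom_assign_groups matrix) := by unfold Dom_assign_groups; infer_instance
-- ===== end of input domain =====

-- B replaces A's explicit-stack worklist DFS by a recursive flood fill (bounds/visited guard at
-- entry, neighbours in reversed order); same return value, no observable mutation (objective: alternative).

-- ===== PORT A =====
-- matrix[x][y], total form: exact whenever 0 ≤ x < len(matrix) and 0 ≤ y < len(row) (all accesses under Pre_)
def mgetA (matrix : List (List Int)) (x y : Int) : Int :=
  (PySem.List.pyGet? ((PySem.List.pyGet? matrix x).getD []) y).getD 0

def dirsA : List (Int × Int) := [(1,0),(-1,0),(0,1),(0,-1),(1,1),(-1,-1),(-1,1),(1,-1)]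

def pvInb (rows cols : Int) (c : Int × Int) : Bool :=
  decide (0 ≤ c.1 ∧ c.1 < rows ∧ 0 ≤ c.2 ∧ c.2 < cols)

-- the bounds-checked push of one neighbour (x+dx, y+dy) onto the stack
def pushA (rows cols x y : Int) (st : List (Int × Int)) (d : Int × Int) : List (Int × Int) :=
  if pvInb rows cols (x + d.1, y + d.2) then (x + d.1, y + d.2) :: st else st

-- termination measure for the while-stack loop (used only by the decreasing_by proofs)
def pvGrid (rows cols : Int) : Finset (Int × Int) :=
  ((List.range rows.toNat).flatMap
    (fun i => (List.range cols.toNat).map (fun j => ((i : Int), (j : Int))))).toFinset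

def pvMu (rows cols : Int) (vis stack : List (Int × Int)) : Nat :=
  9 * ((pvGrid rows cols ∪ stack.toFinset) \ vis.toFinset).card + stack.length

lemma mem_pvGrid (rows cols : Int) (c : Int × Int) :
    c ∈ pvGrid rows cols ↔ pvInb rows cols c = true := by
  obtain ⟨a, b⟩ := c
  simp only [pvGrid, pvInb, List.mem_toFinset, List.mem_flatMap, List.mem_map,
    List.mem_range, Prod.mk.injEq, decide_eq_true_eq]
  constructor
  · rintro ⟨i, hi, j, hj, rfl, rfl⟩
    simp at hi hj
    obtain ⟨i', hi', rfl⟩ := hi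
    obtain ⟨j', hj', rfl⟩ := hj
    omega
  · rintro ⟨h1, h2, h3, h4⟩
    refine ⟨a, ?_, b, ?_, rfl, rfl⟩
    · simp
      exact ⟨a.toNat, by omega, by omega⟩
    · simp
      exact ⟨b.toNat, by omega, by omega⟩

lemma pvMu_skip (rows cols : Int) (vis rest : List (Int × Int)) (c : Int × Int) :
    pvMu rows cols vis rest < pvMu rows cols vis (c :: rest) := by
  have hsub : (pvGrid rows cols ∪ rest.toFinset) \ vis.toFinset ⊆
      (pvGrid rows cols ∪ (c :: rest).toFinset) \ vis.toFinset := by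
    intro x hx
    simp only [Finset.mem_sdiff, Finset.mem_union, List.toFinset_cons, Finset.mem_insert] at hx ⊢
    tauto
  have := Finset.card_le_card hsub
  simp only [pvMu, List.length_cons]
  omega

lemma pvMu_fresh (rows cols : Int) (vis rest ns : List (Int × Int)) (c : Int × Int)
    (hc : c ∉ vis) (hsub : ns.toFinset ⊆ pvGrid rows cols ∪ rest.toFinset)
    (hlen : ns.length ≤ rest.length + 8) :
    pvMu rows cols (vis ++ [c]) ns < pvMu rows cols vis (c :: rest) := by
  have hcmem : c ∈ (pvGrid rows cols ∪ (c :: rest).toFinset) \ vis.toFinset := by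
    refine Finset.mem_sdiff.mpr ⟨Finset.mem_union_right _ (by simp), by simpa using hc⟩
  have hsub2 : (pvGrid rows cols ∪ ns.toFinset) \ (vis ++ [c]).toFinset ⊆
      (((pvGrid rows cols ∪ (c :: rest).toFinset) \ vis.toFinset).erase c) := by
    intro x hx
    simp only [Finset.mem_sdiff, Finset.mem_union, List.toFinset_append, List.toFinset_cons,
      List.toFinset_nil, insert_empty_eq, Finset.mem_insert, Finset.mem_erase,
      Finset.mem_singleton, List.mem_toFinset] at hx ⊢
    rcases hx with ⟨hin, hnv⟩
    simp only [not_or] at hnv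
    refine ⟨hnv.2, ?_, hnv.1⟩
    rcases hin with h | h
    · exact Or.inl h
    · have := hsub (by simpa using h)
      simp only [Finset.mem_union, List.mem_toFinset] at this
      tauto
  have h1 := Finset.card_le_card hsub2
  rw [Finset.card_erase_of_mem hcmem] at h1
  have h2 : 1 ≤ ((pvGrid rows cols ∪ (c :: rest).toFinset) \ vis.toFinset).card :=
    Finset.card_pos.mpr ⟨c, hcmem⟩
  simp only [pvMu, List.length_cons]
  omega

lemma pushA_foldl_facts (rows cols x y : Int) :
    ∀ (ds init : List (Int × Int)),
      (ds.foldl (pushA rows cols x y) init).toFinset ⊆ pvGrid rows cols ∪ init.toFinset ∧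
      (ds.foldl (pushA rows cols x y) init).length ≤ init.length + ds.length := by
  intro ds
  induction ds with
  | nil => intro init; exact ⟨by simp, by simp⟩
  | cons d ds ih =>
    intro init
    simp only [List.foldl_cons]
    rcases ih (pushA rows cols x y init d) with ⟨h1, h2⟩
    have hstep : (pushA rows cols x y init d).toFinset ⊆ pvGrid rows cols ∪ init.toFinset ∧
        (pushA rows cols x y init d).length ≤ init.length + 1 := by
      unfold pushA
      split_ifs with hb
      · constructor
        · intro z hz
          simp only [List.toFinset_cons, Finset.mem_insert, List.mem_toFinset] at hz
          simp only [Finset.mem_union, List.mem_toFinset]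
          rcases hz with rfl | hz
          · exact Or.inl ((mem_pvGrid rows cols _).mpr hb)
          · exact Or.inr hz
        · simp
      · exact ⟨by intro z hz; simp only [Finset.mem_union]; right; exact hz, by simp⟩
    refine ⟨?_, by simp only [List.length_cons]; omega⟩
    intro z hz
    have := h1 hz
    simp only [Finset.mem_union] at this ⊢
    rcases this with h | h
    · exact Or.inl h
    · have := hstep.1 (by simpa using h)
      simpa using this
    
def stackLoopA (matrix : List (List Int)) (rows cols group : Int)
    (vis : PySem.Set (Int × Int)) (groups : PySem.Dict Int (List (Int × Int))) :
    List (Int × Int) → PySem.Set (Int × Int) × PySem.Dict Int (List (Int × Int))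
  | [] => (vis, groups)
  | c :: rest =>
    if c ∈ vis then stackLoopA matrix rows cols group vis groups rest
    else
      if mgetA matrix c.1 c.2 ≠ 2 then
        stackLoopA matrix rows cols group (PySem.Set.add vis c) groups rest
      else
        stackLoopA matrix rows cols group (PySem.Set.add vis c)
          (if groups.contains group then groups.modify group [] (· ++ [c])
           else groups.insert group [c])
          (dirsA.foldl (pushA rows cols c.1 c.2) rest)
termination_by stack => pvMu rows cols vis stack
decreasing_by
  · exact pvMu_skip rows cols vis rest c
  · have h : PySem.Set.add vis c = vis ++ [c] := PySem.Set.add_of_not_mem (by assumption)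
    rw [h]
    exact pvMu_fresh rows cols vis rest rest c (by assumption)
      (by intro z hz; simp only [Finset.mem_union]; right; exact hz) (by omega)
  · have h : PySem.Set.add vis c = vis ++ [c] := PySem.Set.add_of_not_mem (by assumption)
    rw [h]
    rcases pushA_foldl_facts rows cols c.1 c.2 dirsA rest with ⟨h1, h2⟩
    exact pvMu_fresh rows cols vis rest _ c (by assumption) h1 (by simpa [dirsA] using h2)

def assign_groups (matrix : List (List Int)) :
    List (List Int) × (List (Int × List (Int × Int))) :=
  let rows : Int := PySem.List.len matrix
  let cols : Int := PySem.List.len ((PySem.List.pyGet? matrix 0).getD [])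
  let s :=
    (PySem.List.pyRange 0 rows 1).foldl (fun st i =>
      (PySem.List.pyRange 0 cols 1).foldl
        (fun (st : Int × PySem.Set (Int × Int) × PySem.Dict Int (List (Int × Int))) j =>
          if mgetA matrix i j = 2 ∧ (i, j) ∉ st.2.1 then
            (st.1 + 1, stackLoopA matrix rows cols st.1 st.2.1 st.2.2 [(i, j)])
          else st) st)
      ((1 : Int), (PySem.Set.empty : PySem.Set (Int × Int)),
        (PySem.Dict.empty : PySem.Dict Int (List (Int × Int))))
  (matrix, s.2.2.items)

-- ===== PORT B =====
def mgetB (matrix : List (List Int)) (x y : Int) : Int :=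
  (PySem.List.pyGet? ((PySem.List.pyGet? matrix x).getD []) y).getD 0

def dirsB : List (Int × Int) := [(1,-1),(-1,1),(-1,-1),(1,1),(0,-1),(0,1),(-1,0),(1,0)]

-- recursive flood fill; the Nat argument is fuel (totality guard only: rows*cols+1 is proven
-- sufficient below, so on admitted inputs it never runs out)
def dfsB (matrix : List (List Int)) (rows cols group : Int) :
    Nat → (Int × Int) → PySem.Set (Int × Int) × PySem.Dict Int (List (Int × Int)) →
      PySem.Set (Int × Int) × PySem.Dict Int (List (Int × Int))
  | 0, _, s => s
  | Nat.succ fuel, c, s =>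
    if ¬ (0 ≤ c.1 ∧ c.1 < rows ∧ 0 ≤ c.2 ∧ c.2 < cols) ∨ c ∈ s.1 then s
    else
      if mgetB matrix c.1 c.2 ≠ 2 then (PySem.Set.add s.1 c, s.2)
      else
        dirsB.foldl
          (fun t d => dfsB matrix rows cols group fuel (c.1 + d.1, c.2 + d.2) t)
          (PySem.Set.add s.1 c,
           if s.2.contains group then s.2.modify group [] (· ++ [c])
           else s.2.insert group [c])

def assign_groups_alt (matrix : List (List Int)) :
    List (List Int) × (List (Int × List (Int × Int))) :=
  let rows : Int := PySem.List.len matrix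
  let cols : Int := PySem.List.len ((PySem.List.pyGet? matrix 0).getD [])
  let fuel : Nat := rows.toNat * cols.toNat + 1
  let s :=
    (PySem.List.pyRange 0 rows 1).foldl (fun st i =>
      (PySem.List.pyRange 0 cols 1).foldl
        (fun (st : Int × PySem.Set (Int × Int) × PySem.Dict Int (List (Int × Int))) j =>
          if mgetB matrix i j = 2 ∧ (i, j) ∉ st.2.1 then
            (st.1 + 1, dfsB matrix rows cols st.1 fuel (i, j) st.2)
          else st) st)
      ((1 : Int), (PySem.Set.empty : PySem.Set (Int × Int)),
        (PySem.Dict.empty : PySem.Dict Int (List (Int × Int))))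
  (matrix, s.2.2.items)

-- ===== PRECONDITION & SPEC =====
-- Pre_ excludes exactly the ragged matrices on which some scanned row is shorter than row 0:
-- there both Pythons raise IndexError at matrix[x][y].
def Pre_assign_groups (matrix : List (List Int)) : Prop :=
  ∀ row ∈ matrix, ((matrix.headD []).length : Int) ≤ row.length

instance (matrix : List (List Int)) : Decidable (Pre_assign_groups matrix) := by
  unfold Pre_assign_groups; infer_instance

def pvWitness_assign_groups : List (List Int) := [[2, 0], [0, 2]]

def Spec_assign_groups (matrix : List (List Int))
    (out : List (List Int) × (List (Int × List (Int × Int)))) : Prop :=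
  out = assign_groups_alt matrix

instance (matrix : List (List Int)) (out : List (List Int) × (List (Int × List (Int × Int)))) :
    Decidable (Spec_assign_groups matrix out) := by unfold Spec_assign_groups; infer_instance

-- ===== CLAIM (what is proved, stated in full; the proofs are below) =====
def Claim_equal_assign_groups : Prop :=
  ∀ (matrix : List (List Int)), Dom_assign_groups matrix → Pre_assign_groups matrix →
    Spec_assign_groups matrix (assign_groups matrix)

-- ===== LEMMAS AND PROOFS =====

lemma mget_eq (matrix : List (List Int)) (x y : Int) : mgetB matrix x y = mgetA matrix x y := rfl

lemma card_pvGrid_le (rows cols : Int) :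
    (pvGrid rows cols).card ≤ rows.toNat * cols.toNat := by
  refine le_trans (List.toFinset_card_le _) ?_
  simp [List.length_flatMap, Function.comp_def, List.map_const', Nat.mul_comm]

-- one-step unfolding of the stack loop
lemma SL_nil (matrix : List (List Int)) (rows cols group : Int)
    (vis : PySem.Set (Int × Int)) (groups : PySem.Dict Int (List (Int × Int))) :
    stackLoopA matrix rows cols group vis groups [] = (vis, groups) := by
  rw [stackLoopA.eq_def]

lemma SL_cons (matrix : List (List Int)) (rows cols group : Int)
    (vis : PySem.Set (Int × Int)) (groups : PySem.Dict Int (List (Int × Int)))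
    (c : Int × Int) (rest : List (Int × Int)) :
    stackLoopA matrix rows cols group vis groups (c :: rest)
      = if c ∈ vis then stackLoopA matrix rows cols group vis groups rest
        else if mgetA matrix c.1 c.2 ≠ 2 then
          stackLoopA matrix rows cols group (PySem.Set.add vis c) groups rest
        else
          stackLoopA matrix rows cols group (PySem.Set.add vis c)
            (if groups.contains group then groups.modify group [] (· ++ [c])
             else groups.insert group [c])
            (dirsA.foldl (pushA rows cols c.1 c.2) rest) := by
  rw [stackLoopA.eq_def]

-- visited only grows along the stack loop
lemma SL_mono (matrix : List (List Int)) (rows cols group : Int) :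
    ∀ (n : Nat) (vis : PySem.Set (Int × Int)) (groups : PySem.Dict Int (List (Int × Int)))
      (stack : List (Int × Int)), pvMu rows cols vis stack ≤ n →
      vis.toFinset ⊆ (stackLoopA matrix rows cols group vis groups stack).1.toFinset := by
  intro n
  induction n using Nat.strong_induction_on with
  | _ n IH =>
    intro vis groups stack hmu
    match stack with
    | [] => rw [SL_nil]
    | c :: rest =>
      rw [SL_cons]
      by_cases hc : c ∈ vis
      · rw [if_pos hc]
        exact IH _ (lt_of_lt_of_le (pvMu_skip rows cols vis rest c) hmu) vis groups rest le_rfl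
      · rw [if_neg hc]
        have hadd : vis.toFinset ⊆ (PySem.Set.add vis c).toFinset := by
          rw [PySem.Set.add_of_not_mem hc]; simp
        by_cases hm : mgetA matrix c.1 c.2 ≠ 2
        · rw [if_pos hm]
          have hdec : pvMu rows cols (PySem.Set.add vis c) rest < pvMu rows cols vis (c :: rest) := by
            rw [PySem.Set.add_of_not_mem hc]
            exact pvMu_fresh rows cols vis rest rest c hc
              (by intro z hz; simp only [Finset.mem_union]; right; exact hz) (by omega)
          exact Finset.Subset.trans hadd
            (IH _ (lt_of_lt_of_le hdec hmu) _ _ rest le_rfl)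
        · rw [if_neg hm]
          have hdec : pvMu rows cols (PySem.Set.add vis c)
              (dirsA.foldl (pushA rows cols c.1 c.2) rest) < pvMu rows cols vis (c :: rest) := by
            rw [PySem.Set.add_of_not_mem hc]
            rcases pushA_foldl_facts rows cols c.1 c.2 dirsA rest with ⟨h1, h2⟩
            exact pvMu_fresh rows cols vis rest _ c hc h1 (by simpa [dirsA] using h2)
          exact Finset.Subset.trans hadd
            (IH _ (lt_of_lt_of_le hdec hmu) _ _ _ le_rfl)

-- the bounds-checked pushes are the reversed filtered neighbour list
lemma pushA_foldl_eq (rows cols x y : Int) (ds init : List (Int × Int)) :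
    ds.foldl (pushA rows cols x y) init
      = ((ds.map (fun d => (x + d.1, y + d.2))).filter (pvInb rows cols)).reverse ++ init := by
  induction ds generalizing init with
  | nil => simp
  | cons d ds ih =>
    simp only [List.foldl_cons, List.map_cons, List.filter_cons]
    rw [ih]
    unfold pushA
    by_cases hb : pvInb rows cols (x + d.1, y + d.2)
    · simp [hb]
    · simp [hb]

-- the stack loop splits along ++ (processing l1 cannot reach l2 before l1's part is exhausted)
lemma SL_append (matrix : List (List Int)) (rows cols group : Int) :
    ∀ (n : Nat) (vis : PySem.Set (Int × Int)) (groups : PySem.Dict Int (List (Int × Int)))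
      (l1 l2 : List (Int × Int)), pvMu rows cols vis l1 ≤ n →
      stackLoopA matrix rows cols group vis groups (l1 ++ l2)
        = stackLoopA matrix rows cols group (stackLoopA matrix rows cols group vis groups l1).1
            (stackLoopA matrix rows cols group vis groups l1).2 l2 := by
  intro n
  induction n using Nat.strong_induction_on with
  | _ n IH =>
    intro vis groups l1 l2 hmu
    match l1 with
    | [] => simp only [List.nil_append, SL_nil]
    | c :: rest =>
      rw [List.cons_append, SL_cons, SL_cons]
      by_cases hc : c ∈ vis
      · simp only [if_pos hc]
        exact IH _ (lt_of_lt_of_le (pvMu_skip rows cols vis rest c) hmu) vis groups rest l2 le_rfl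
      · simp only [if_neg hc]
        by_cases hm : mgetA matrix c.1 c.2 ≠ 2
        · simp only [if_pos hm]
          have hdec : pvMu rows cols (PySem.Set.add vis c) rest < pvMu rows cols vis (c :: rest) := by
            rw [PySem.Set.add_of_not_mem hc]
            exact pvMu_fresh rows cols vis rest rest c hc
              (by intro z hz; simp only [Finset.mem_union]; right; exact hz) (by omega)
          exact IH _ (lt_of_lt_of_le hdec hmu) _ _ rest l2 le_rfl
        · simp only [if_neg hm]
          rw [pushA_foldl_eq rows cols c.1 c.2 dirsA (rest ++ l2),
              pushA_foldl_eq rows cols c.1 c.2 dirsA rest, ← List.append_assoc]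
          have hdec : pvMu rows cols (PySem.Set.add vis c)
              (((dirsA.map (fun d => (c.1 + d.1, c.2 + d.2))).filter (pvInb rows cols)).reverse ++ rest)
              < pvMu rows cols vis (c :: rest) := by
            rw [PySem.Set.add_of_not_mem hc]
            rcases pushA_foldl_facts rows cols c.1 c.2 dirsA rest with ⟨h1, h2⟩
            rw [pushA_foldl_eq rows cols c.1 c.2 dirsA rest] at h1 h2
            exact pvMu_fresh rows cols vis rest _ c hc h1 (by simpa [dirsA] using h2)
          exact IH _ (lt_of_lt_of_le hdec hmu) _ _ _ l2 le_rfl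

-- core equivalence: the recursive flood fill equals the stack loop (fuel-indexed, mutual with
-- the statement for a list of pending calls)
lemma dfs_eq_SL (matrix : List (List Int)) (rows cols group : Int) :
    ∀ (fuel : Nat),
      (∀ (c : Int × Int) (vis : PySem.Set (Int × Int)) (groups : PySem.Dict Int (List (Int × Int))),
        pvInb rows cols c = true → (pvGrid rows cols \ vis.toFinset).card < fuel →
        dfsB matrix rows cols group fuel c (vis, groups)
          = stackLoopA matrix rows cols group vis groups [c]) ∧
      (∀ (cells : List (Int × Int)) (vis : PySem.Set (Int × Int))
          (groups : PySem.Dict Int (List (Int × Int))),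
        (pvGrid rows cols \ vis.toFinset).card < fuel →
        cells.foldl (fun t c => dfsB matrix rows cols group fuel c t) (vis, groups)
          = stackLoopA matrix rows cols group vis groups (cells.filter (pvInb rows cols))) := by
  intro fuel
  induction fuel with
  | zero => exact ⟨fun c vis groups _ h => absurd h (by omega),
                   fun cells vis groups h => absurd h (by omega)⟩
  | succ f ihf =>
    have hL2 : ∀ (c : Int × Int) (vis : PySem.Set (Int × Int))
        (groups : PySem.Dict Int (List (Int × Int))),
        pvInb rows cols c = true → (pvGrid rows cols \ vis.toFinset).card < f + 1 →
        dfsB matrix rows cols group (f + 1) c (vis, groups)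
          = stackLoopA matrix rows cols group vis groups [c] := by
      intro c vis groups hb hcard
      rw [dfsB, SL_cons]
      have hbp : 0 ≤ c.1 ∧ c.1 < rows ∧ 0 ≤ c.2 ∧ c.2 < cols := by
        simpa [pvInb] using hb
      by_cases hc : c ∈ vis
      · rw [if_pos (Or.inr hc), if_pos hc, SL_nil]
      · rw [if_neg (not_or.mpr ⟨not_not_intro hbp, hc⟩), if_neg hc]
        by_cases hm : mgetA matrix c.1 c.2 ≠ 2
        · rw [if_pos (show mgetB matrix c.1 c.2 ≠ 2 by rw [mget_eq]; exact hm), if_pos hm,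
            SL_nil]
        · rw [if_neg (show ¬ mgetB matrix c.1 c.2 ≠ 2 by rw [mget_eq]; exact hm), if_neg hm]
          -- fresh cell of value 2: both record it and proceed over the neighbours
          have hcg : c ∈ pvGrid rows cols := (mem_pvGrid rows cols c).mpr hb
          have hcmem : c ∈ pvGrid rows cols \ vis.toFinset := by
            simp only [Finset.mem_sdiff, List.mem_toFinset]; exact ⟨hcg, hc⟩
          have hcard' : (pvGrid rows cols \ (PySem.Set.add vis c).toFinset).card < f := by
            rw [PySem.Set.add_of_not_mem hc]
            have hsub : pvGrid rows cols \ (vis ++ [c]).toFinset ⊆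
                (pvGrid rows cols \ vis.toFinset).erase c := by
              intro z hz
              simp only [Finset.mem_sdiff, List.toFinset_append, List.toFinset_cons,
                List.toFinset_nil, insert_empty_eq, Finset.mem_union, Finset.mem_erase, Finset.mem_singleton, List.mem_toFinset, not_or] at hz ⊢
              tauto
            have h1 := Finset.card_le_card hsub
            rw [Finset.card_erase_of_mem hcmem] at h1
            have h2 : 1 ≤ (pvGrid rows cols \ vis.toFinset).card :=
              Finset.card_pos.mpr ⟨c, hcmem⟩
            omega
          rw [pushA_foldl_eq rows cols c.1 c.2 dirsA [], List.append_nil]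
          rw [← List.filter_reverse, ← List.map_reverse]
          rw [show dirsA.reverse = dirsB from rfl]
          rw [← ihf.2 ((dirsB.map (fun d => (c.1 + d.1, c.2 + d.2)))) _ _ hcard']
          rw [List.foldl_map]
    exact ⟨hL2, by
      intro cells
      induction cells with
      | nil => intro vis groups hcard; simp [stackLoopA]
      | cons c t iht =>
        intro vis groups hcard
        simp only [List.foldl_cons, List.filter_cons]
        by_cases hb : pvInb rows cols c = true
        · rw [if_pos hb]
          by_cases hc : c ∈ vis
          · -- dfsB returns the state unchanged; the stack loop skips c
            have hskip : dfsB matrix rows cols group (f + 1) c (vis, groups) = (vis, groups) := by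
              rw [dfsB]; rw [if_pos (Or.inr hc)]
            rw [hskip, iht vis groups hcard, SL_cons, if_pos hc]
          · rw [hL2 c vis groups hb hcard]
            have hmono := SL_mono matrix rows cols group (pvMu rows cols vis [c])
              vis groups [c] le_rfl
            have hcard2 : ((pvGrid rows cols) \ (stackLoopA matrix rows cols group vis groups [c]).1.toFinset).card < f + 1 :=
              lt_of_le_of_lt
                (Finset.card_le_card (Finset.sdiff_subset_sdiff (Finset.Subset.refl _) hmono))
                hcard
            rw [iht _ _ hcard2]
            have := SL_append matrix rows cols group (pvMu rows cols vis [c]) vis groups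
              [c] (t.filter (pvInb rows cols)) le_rfl
            rw [← this, List.cons_append, List.nil_append]
        · -- out-of-bounds neighbour: dfsB returns immediately, the filter drops it
          have hskip : dfsB matrix rows cols group (f + 1) c (vis, groups) = (vis, groups) := by
            rw [dfsB]
            rw [if_pos (Or.inl (by simpa [pvInb] using hb))]
          rw [if_neg hb, hskip, iht vis groups hcard]⟩

theorem assign_groups_spec : Claim_equal_assign_groups := by
  unfold Claim_equal_assign_groups
  intro matrix _ _
  unfold Spec_assign_groups assign_groups assign_groups_alt
  simp only []
  congr 2
  congr 1
  congr 1
  apply PySem.List.foldl_congr_mem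
  intro acc i hi
  apply PySem.List.foldl_congr_mem
  intro acc2 j hj
  rw [mget_eq]
  by_cases hcond : mgetA matrix i j = 2 ∧ (i, j) ∉ acc2.2.1
  · rw [if_pos hcond, if_pos hcond]
    congr 1
    have hi' := (PySem.List.mem_pyRange_one).mp hi
    have hj' := (PySem.List.mem_pyRange_one).mp hj
    set rows : Int := PySem.List.len matrix
    set cols : Int := PySem.List.len ((PySem.List.pyGet? matrix 0).getD [])
    have hb : pvInb rows cols (i, j) = true := by simp [pvInb]; omega
    have hcard : (pvGrid rows cols \ acc2.2.1.toFinset).card < rows.toNat * cols.toNat + 1 := by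
      have h1 := Finset.card_le_card (Finset.sdiff_subset (s := pvGrid rows cols)
        (t := acc2.2.1.toFinset))
      have h2 := card_pvGrid_le rows cols
      omega
    exact ((dfs_eq_SL matrix rows cols acc2.1 (rows.toNat * cols.toNat + 1)).1
      (i, j) acc2.2.1 acc2.2.2 hb hcard).symm
  · rw [if_neg hcond, if_neg hcond]
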